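-- pv_equiv track=rewrite | github.com/Kyeonghyeon-Park/Incentive_design-BO-with_successor_features | networks_ssd_new.py | make_layer_dims
-- ===== SOURCE A (Python) =====
-- def make_layer_dims(observation_dim, action_dim, feature_dim, hidden_dims, mode='actor'):
--     """
--     Make the list of layer dimensions
--     Each element is the dimension of layers ([input_dim, output_dim])
--     Unlike previous implementation (taxi example), action is added into second layer
--     In addition, the dimension of mean_action is assumed to be same as the dimension of action
--
--     Parameters
--     ----------
--     observation_dim : int
--     action_dim : int
--     feature_dim : int
--     hidden_dims : list
--         List of hidden layers' size
--     mode : str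
--         'actor' or 'critic' or 'psi'
--
--     Returns
--     -------
--     layer_dims : list
--         List of list
--         Each element is the dimension of layers ([input_dim, output_dim])
--     """
--     layer_dims = []
--     if mode == 'actor':
--         for i in range(len(hidden_dims)):
--             if i == 0:
--                 layer_dim = [observation_dim, hidden_dims[i]]
--             else:
--                 layer_dim = [hidden_dims[i - 1], hidden_dims[i]]
--             layer_dims.append(layer_dim)
--         layer_dim = [hidden_dims[-1], action_dim]
--         layer_dims.append(layer_dim)
--     elif mode == 'critic':
--         for i in range(len(hidden_dims)):
--             if i == 0:
--                 layer_dim = [observation_dim, hidden_dims[i]]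
--             elif i == 1:
--                 layer_dim = [hidden_dims[i - 1] + action_dim * 2, hidden_dims[i]]
--             else:
--                 layer_dim = [hidden_dims[i - 1], hidden_dims[i]]
--             layer_dims.append(layer_dim)
--         layer_dim = [hidden_dims[-1], 1]
--         layer_dims.append(layer_dim)
--     elif mode == 'psi':
--         for i in range(len(hidden_dims)):
--             if i == 0:
--                 layer_dim = [observation_dim, hidden_dims[i]]
--             elif i == 1:
--                 layer_dim = [hidden_dims[i - 1] + action_dim * 2, hidden_dims[i]]
--             else:
--                 layer_dim = [hidden_dims[i - 1], hidden_dims[i]]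
--             layer_dims.append(layer_dim)
--         layer_dim = [hidden_dims[-1], feature_dim]
--         layer_dims.append(layer_dim)
--     else:
--         raise ValueError
--     return layer_dims
-- ===== SOURCE B (Python) =====
-- def make_layer_dims(observation_dim, action_dim, feature_dim, hidden_dims, mode='actor'):
--     if mode == 'actor':
--         final, bonus = action_dim, 0
--     elif mode == 'critic':
--         final, bonus = 1, action_dim * 2
--     elif mode == 'psi':
--         final, bonus = feature_dim, action_dim * 2
--     else:
--         raise ValueError
--
--     def chain(prev, rest, extra):
--         # extra widens the input of the next hidden layer only; the last pair feeds `final`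
--         if not rest:
--             return [[prev, final]]
--         return [[prev + extra, rest[0]]] + chain(rest[0], rest[1:], 0)
--
--     return [[observation_dim, hidden_dims[0]]] + chain(hidden_dims[0], hidden_dims[1:], bonus)
-- ===== Notes on version B (the rewrite author's own statement) =====
-- stated objective: alternative
-- what changed: Replaces A's three per-mode index loops (with i==0/i==1 branches and hidden_dims[-1] indexing) by a mode table giving (final,bonus) and a single cons-recursion that threads the previous layer width, consuming the mean-action bonus on its first step only.
import Mathlib
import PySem

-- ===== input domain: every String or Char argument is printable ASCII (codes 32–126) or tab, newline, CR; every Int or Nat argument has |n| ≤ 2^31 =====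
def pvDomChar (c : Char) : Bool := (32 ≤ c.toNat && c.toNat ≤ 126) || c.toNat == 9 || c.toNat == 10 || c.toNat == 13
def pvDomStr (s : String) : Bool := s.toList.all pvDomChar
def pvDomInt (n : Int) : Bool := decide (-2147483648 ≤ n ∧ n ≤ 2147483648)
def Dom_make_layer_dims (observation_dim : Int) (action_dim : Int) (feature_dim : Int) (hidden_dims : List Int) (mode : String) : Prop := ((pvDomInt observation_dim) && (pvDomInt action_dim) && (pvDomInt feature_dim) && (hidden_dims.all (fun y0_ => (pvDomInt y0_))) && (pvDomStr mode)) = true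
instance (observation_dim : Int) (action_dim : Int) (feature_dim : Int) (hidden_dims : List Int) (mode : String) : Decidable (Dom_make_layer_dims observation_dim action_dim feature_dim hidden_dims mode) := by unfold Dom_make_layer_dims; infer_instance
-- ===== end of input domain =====

-- B replaces A's three per-mode index loops by a mode table (final, bonus) and one cons-recursion
-- threading the previous layer width, consuming the bonus on its first step (objective: alternative).

-- ===== PORT A =====
-- literal transliteration of A: one loop per mode over range(len(hidden_dims)) appending pairs,
-- then the final [hidden_dims[-1], out_dim] pair; the ValueError branch returns [] (outside Pre_)
def make_layer_dims (observation_dim : Int) (action_dim : Int) (feature_dim : Int) (hidden_dims : List Int) (mode : String) : List (List Int) :=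
  if mode == "actor" then
    ((PySem.List.pyRange 0 (hidden_dims.length : Int) 1).foldl (fun layer_dims i =>
        layer_dims ++ [if i == 0 then
            [observation_dim, PySem.List.pyGetD hidden_dims i 0]
          else
            [PySem.List.pyGetD hidden_dims (i - 1) 0, PySem.List.pyGetD hidden_dims i 0]]) [])
      ++ [[PySem.List.pyGetD hidden_dims (-1) 0, action_dim]]
  else if mode == "critic" then
    ((PySem.List.pyRange 0 (hidden_dims.length : Int) 1).foldl (fun layer_dims i =>
        layer_dims ++ [if i == 0 then
            [observation_dim, PySem.List.pyGetD hidden_dims i 0]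
          else if i == 1 then
            [PySem.List.pyGetD hidden_dims (i - 1) 0 + action_dim * 2, PySem.List.pyGetD hidden_dims i 0]
          else
            [PySem.List.pyGetD hidden_dims (i - 1) 0, PySem.List.pyGetD hidden_dims i 0]]) [])
      ++ [[PySem.List.pyGetD hidden_dims (-1) 0, 1]]
  else if mode == "psi" then
    ((PySem.List.pyRange 0 (hidden_dims.length : Int) 1).foldl (fun layer_dims i =>
        layer_dims ++ [if i == 0 then
            [observation_dim, PySem.List.pyGetD hidden_dims i 0]
          else if i == 1 then
            [PySem.List.pyGetD hidden_dims (i - 1) 0 + action_dim * 2, PySem.List.pyGetD hidden_dims i 0]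
          else
            [PySem.List.pyGetD hidden_dims (i - 1) 0, PySem.List.pyGetD hidden_dims i 0]]) [])
      ++ [[PySem.List.pyGetD hidden_dims (-1) 0, feature_dim]]
  else []  -- Python A raises ValueError here (outside Pre_)

-- ===== PORT B =====
-- Source B's 'chain(prev, rest, extra)': cons-recursion threading the previous layer width;
-- extra is consumed by the first emitted pair only, the base case feeds `fin`
def chainB (fin : Int) (prev : Int) (rest : List Int) (extra : Int) : List (List Int) :=
  match rest with
  | [] => [[prev, fin]]
  | h :: t => [prev + extra, h] :: chainB fin h t 0

def make_layer_dims_alt (observation_dim : Int) (action_dim : Int) (feature_dim : Int) (hidden_dims : List Int) (mode : String) : List (List Int) :=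
  if mode == "actor" || mode == "critic" || mode == "psi" then
    let fin : Int := if mode == "actor" then action_dim else if mode == "critic" then 1 else feature_dim
    let bonus : Int := if mode == "actor" then 0 else action_dim * 2
    match hidden_dims with
    | [] => []  -- Python B raises IndexError here (hidden_dims[0]); outside Pre_
    | h :: t => [observation_dim, h] :: chainB fin h t bonus
  else []  -- Python B raises ValueError here (outside Pre_)

-- ===== PRECONDITION & SPEC =====
-- Pre_ excludes only inputs on which Python A raises: an unknown mode (ValueError) and
-- empty hidden_dims (IndexError on hidden_dims[-1]); Python B raises on exactly the same inputs.
def Pre_make_layer_dims (observation_dim : Int) (action_dim : Int) (feature_dim : Int) (hidden_dims : List Int) (mode : String) : Prop :=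
  (mode = "actor" ∨ mode = "critic" ∨ mode = "psi") ∧ hidden_dims ≠ []
instance (observation_dim : Int) (action_dim : Int) (feature_dim : Int) (hidden_dims : List Int) (mode : String) : Decidable (Pre_make_layer_dims observation_dim action_dim feature_dim hidden_dims mode) := by unfold Pre_make_layer_dims; infer_instance
def pvWitness_make_layer_dims : Int × Int × Int × List Int × String := (4, 2, 3, [8, 8], "critic")

def Spec_make_layer_dims (observation_dim : Int) (action_dim : Int) (feature_dim : Int) (hidden_dims : List Int) (mode : String) (out : List (List Int)) : Prop := out = make_layer_dims_alt observation_dim action_dim feature_dim hidden_dims mode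
instance (observation_dim : Int) (action_dim : Int) (feature_dim : Int) (hidden_dims : List Int) (mode : String) (out : List (List Int)) : Decidable (Spec_make_layer_dims observation_dim action_dim feature_dim hidden_dims mode out) := by unfold Spec_make_layer_dims; infer_instance

-- ===== CLAIM (what is proved, stated in full; the proofs are below) =====
def Claim_equal_make_layer_dims : Prop := ∀ (observation_dim : Int) (action_dim : Int) (feature_dim : Int) (hidden_dims : List Int) (mode : String), Dom_make_layer_dims observation_dim action_dim feature_dim hidden_dims mode → Pre_make_layer_dims observation_dim action_dim feature_dim hidden_dims mode → Spec_make_layer_dims observation_dim action_dim feature_dim hidden_dims mode (make_layer_dims observation_dim action_dim feature_dim hidden_dims mode)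

-- ===== LEMMAS AND PROOFS =====

-- proof-side helper: consecutive pairs of a dimension spine
def spinePairs (s : List Int) : List (List Int) := (s.zip s.tail).map (fun p => [p.1, p.2])

-- the per-index pair appended by A's actor loop (getD form)
def fAct (hd : List Int) (obs : Int) (k : Nat) : List Int :=
  if k = 0 then [obs, hd.getD 0 0] else [hd.getD (k - 1) 0, hd.getD k 0]

-- the per-index pair appended by A's critic/psi loop
def fCri (hd : List Int) (obs a2 : Int) (k : Nat) : List Int :=
  if k = 0 then [obs, hd.getD 0 0]
  else if k = 1 then [hd.getD 0 0 + a2, hd.getD 1 0]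
  else [hd.getD (k - 1) 0, hd.getD k 0]

theorem spinePairs_cons_cons (a b : Int) (t : List Int) :
    spinePairs (a :: b :: t) = [a, b] :: spinePairs (b :: t) := rfl

theorem fAct_shift (x obs : Int) (rest : List Int) (k : Nat) :
    fAct (x :: rest) obs (k + 1) = fAct rest x k := by
  cases k with
  | zero => simp [fAct]
  | succ n => simp [fAct]

theorem getLastD_cons_cons (x y : Int) (rs : List Int) :
    (x :: y :: rs).getLastD 0 = (y :: rs).getLastD 0 := by
  simp [List.getLastD_cons]

-- A's actor-style loop pairs followed by the final pair are exactly the spine pairs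
theorem actor_core : ∀ (rest : List Int) (x obs fin : Int),
    (List.range (rest.length + 1)).map (fAct (x :: rest) obs) ++ [[(x :: rest).getLastD 0, fin]]
      = spinePairs (obs :: (x :: rest) ++ [fin]) := by
  intro rest
  induction rest with
  | nil =>
      intro x obs fin
      simp [fAct, spinePairs, List.range_succ]
  | cons y rs ih =>
      intro x obs fin
      have hlen : (y :: rs).length + 1 = (rs.length + 1) + 1 := by simp
      have h1 : (List.range ((y :: rs).length + 1)).map (fAct (x :: y :: rs) obs)
          = fAct (x :: y :: rs) obs 0 :: (List.range (rs.length + 1)).map (fAct (y :: rs) x) := by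
        rw [hlen, List.range_succ_eq_map, List.map_cons, List.map_map]
        congr 1
        apply List.map_congr_left
        intro k _
        simpa [Function.comp, Nat.succ_eq_add_one] using fAct_shift x obs (y :: rs) k
      calc (List.range ((y :: rs).length + 1)).map (fAct (x :: y :: rs) obs)
            ++ [[(x :: y :: rs).getLastD 0, fin]]
          = fAct (x :: y :: rs) obs 0 ::
              ((List.range (rs.length + 1)).map (fAct (y :: rs) x) ++ [[(y :: rs).getLastD 0, fin]]) := by
            rw [h1, getLastD_cons_cons, List.cons_append]
        _ = [obs, x] :: spinePairs (x :: (y :: rs) ++ [fin]) := by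
            rw [ih y]
            simp [fAct]
        _ = spinePairs (obs :: (x :: y :: rs) ++ [fin]) := by
            simp only [List.cons_append, List.nil_append, spinePairs_cons_cons]

-- bridge: A's actor fold over pyRange is the map of fAct over List.range
theorem actor_bridge (hd : List Int) (obs : Int) :
    (PySem.List.pyRange 0 (hd.length : Int) 1).foldl (fun layer_dims i =>
        layer_dims ++ [if i == 0 then
            [obs, PySem.List.pyGetD hd i 0]
          else
            [PySem.List.pyGetD hd (i - 1) 0, PySem.List.pyGetD hd i 0]]) []
      = (List.range hd.length).map (fAct hd obs) := by
  rw [PySem.List.foldl_append_singleton_eq_map, PySem.List.pyRange_zero_natCast, List.map_map,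
      List.nil_append]
  apply List.map_congr_left
  intro k _
  cases k with
  | zero => simp [fAct, PySem.List.pyGetD_zero]
  | succ n =>
      have e1 : PySem.List.pyGetD hd ((n : Int) + 1) 0 = hd.getD (n + 1) 0 := by
        rw [show ((n : Int) + 1) = ((n + 1 : Nat) : Int) by push_cast; ring,
            PySem.List.pyGetD_natCast]
      have e2 : PySem.List.pyGetD hd ((n : Int) + 1 - 1) 0 = hd.getD n 0 := by
        rw [show ((n : Int) + 1 - 1) = ((n : Nat) : Int) by push_cast; ring,
            PySem.List.pyGetD_natCast]
      simp [fAct, e1, e2, show ((n : Int) + 1) ≠ 0 by omega]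

-- bridge: A's critic/psi fold over pyRange is the map of fCri over List.range
theorem critic_bridge (hd : List Int) (obs a2 : Int) :
    (PySem.List.pyRange 0 (hd.length : Int) 1).foldl (fun layer_dims i =>
        layer_dims ++ [if i == 0 then
            [obs, PySem.List.pyGetD hd i 0]
          else if i == 1 then
            [PySem.List.pyGetD hd (i - 1) 0 + a2, PySem.List.pyGetD hd i 0]
          else
            [PySem.List.pyGetD hd (i - 1) 0, PySem.List.pyGetD hd i 0]]) []
      = (List.range hd.length).map (fCri hd obs a2) := by
  rw [PySem.List.foldl_append_singleton_eq_map, PySem.List.pyRange_zero_natCast, List.map_map,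
      List.nil_append]
  apply List.map_congr_left
  intro k _
  match k with
  | 0 => simp [fCri, PySem.List.pyGetD_zero]
  | 1 => simp [fCri, PySem.List.pyGetD_zero, PySem.List.pyGetD_ofNat']
  | (n + 2) =>
      have e1 : PySem.List.pyGetD hd ((n : Int) + 2) 0 = hd.getD (n + 2) 0 := by
        rw [show ((n : Int) + 2) = ((n + 2 : Nat) : Int) by push_cast; ring,
            PySem.List.pyGetD_natCast]
      have e2 : PySem.List.pyGetD hd ((n : Int) + 2 - 1) 0 = hd.getD (n + 1) 0 := by
        rw [show ((n : Int) + 2 - 1) = ((n + 1 : Nat) : Int) by push_cast; ring,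
            PySem.List.pyGetD_natCast]
      simp [fCri, e1, e2, show ((n : Int) + 2) ≠ 0 by omega, show ((n : Int) + 2) ≠ 1 by omega]

theorem pyGetD_last_cons (x : Int) (rest : List Int) :
    PySem.List.pyGetD (x :: rest) (-1) 0 = (x :: rest).getLastD 0 := by
  rw [PySem.List.pyGetD_neg_one (x :: rest) 0 (by simp)]
  simp [List.getLastD_eq_getLast?, List.getLast?_eq_some_getLast]

theorem fCri_shift2 (x y obs a2 : Int) (rs : List Int) (k : Nat) :
    fCri (x :: y :: rs) obs a2 (k + 2) = fAct (y :: rs) x (k + 1) := by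
  simp [fCri, fAct]

-- tail form of actor_core: pairs from index 1 on
theorem actor_tail (rs : List Int) (x y fin : Int) :
    (List.range rs.length).map (fun k => fAct (y :: rs) x (k + 1)) ++ [[(y :: rs).getLastD 0, fin]]
      = spinePairs (y :: rs ++ [fin]) := by
  have h := actor_core rs y x fin
  simp only [List.cons_append, List.nil_append] at h ⊢
  rw [List.range_succ_eq_map, List.map_cons, List.map_map, List.cons_append,
      spinePairs_cons_cons] at h
  have h0 : fAct (y :: rs) x 0 = [x, y] := by simp [fAct]
  rw [h0] at h
  have h' := List.cons_injective h
  simpa [Function.comp, Nat.succ_eq_add_one] using h'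

-- the critic/psi loop pairs plus the final pair: first two pairs explicit, then spine pairs
theorem critic_core (rs : List Int) (x y obs fin a2 : Int) :
    (List.range (rs.length + 2)).map (fCri (x :: y :: rs) obs a2) ++ [[(x :: y :: rs).getLastD 0, fin]]
      = [obs, x] :: [x + a2, y] :: spinePairs (y :: rs ++ [fin]) := by
  have hmap : (List.range (rs.length + 2)).map (fCri (x :: y :: rs) obs a2)
      = [obs, x] :: [x + a2, y] ::
          (List.range rs.length).map (fun k => fAct (y :: rs) x (k + 1)) := by
    have h2 : rs.length + 2 = (rs.length + 1) + 1 := rfl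
    rw [h2, List.range_succ_eq_map, List.range_succ_eq_map]
    simp only [List.map_cons, List.map_map]
    refine congrArg₂ (· :: ·) rfl (congrArg₂ (· :: ·) rfl ?_)
    apply List.map_congr_left
    intro k _
    simpa [Function.comp, Nat.succ_eq_add_one] using fCri_shift2 x y obs a2 rs k
  rw [hmap]
  simp only [List.cons_append, List.nil_append]
  rw [getLastD_cons_cons, actor_tail]
  rfl

-- B's chain with extra 0 computes exactly the spine pairs from prev to fin
theorem chainB_zero_eq_spine : ∀ (rest : List Int) (x fin : Int),
    chainB fin x rest 0 = spinePairs (x :: rest ++ [fin]) := by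
  intro rest
  induction rest with
  | nil => intro x fin; simp [chainB, spinePairs]
  | cons y t ih =>
      intro x fin
      simp only [chainB, List.cons_append, spinePairs_cons_cons, ih, add_zero]

-- ===== VERDICT (by name: the statement is the Claim_ definition above) =====
theorem make_layer_dims_spec : Claim_equal_make_layer_dims := by
  intro obs act feat hd mode _ hpre
  obtain ⟨hm, hne⟩ := hpre
  unfold Spec_make_layer_dims
  cases hd with
  | nil => exact absurd rfl hne
  | cons x rest =>
    rcases hm with h | h | h
    · -- actor
      subst h
      show ((PySem.List.pyRange 0 (((x :: rest) : List Int).length : Int) 1).foldl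
            (fun layer_dims i => layer_dims ++ [if i == 0 then
                [obs, PySem.List.pyGetD (x :: rest) i 0]
              else
                [PySem.List.pyGetD (x :: rest) (i - 1) 0, PySem.List.pyGetD (x :: rest) i 0]]) [])
          ++ [[PySem.List.pyGetD (x :: rest) (-1) 0, act]]
          = [obs, x] :: chainB act x rest 0
      rw [actor_bridge, pyGetD_last_cons, chainB_zero_eq_spine]
      have := actor_core rest x obs act
      simpa [spinePairs_cons_cons] using this
    · -- critic
      subst h
      cases rest with
      | nil =>
          show ((PySem.List.pyRange 0 ((([x] : List Int)).length : Int) 1).foldl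
                (fun layer_dims i => layer_dims ++ [if i == 0 then
                    [obs, PySem.List.pyGetD [x] i 0]
                  else if i == 1 then
                    [PySem.List.pyGetD [x] (i - 1) 0 + act * 2, PySem.List.pyGetD [x] i 0]
                  else
                    [PySem.List.pyGetD [x] (i - 1) 0, PySem.List.pyGetD [x] i 0]]) [])
              ++ [[PySem.List.pyGetD [x] (-1) 0, 1]]
              = [obs, x] :: chainB 1 x [] (act * 2)
          rw [critic_bridge, pyGetD_last_cons]
          simp [fCri, chainB, List.range_succ]
      | cons y rs =>
          show ((PySem.List.pyRange 0 (((x :: y :: rs) : List Int).length : Int) 1).foldl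
                (fun layer_dims i => layer_dims ++ [if i == 0 then
                    [obs, PySem.List.pyGetD (x :: y :: rs) i 0]
                  else if i == 1 then
                    [PySem.List.pyGetD (x :: y :: rs) (i - 1) 0 + act * 2, PySem.List.pyGetD (x :: y :: rs) i 0]
                  else
                    [PySem.List.pyGetD (x :: y :: rs) (i - 1) 0, PySem.List.pyGetD (x :: y :: rs) i 0]]) [])
              ++ [[PySem.List.pyGetD (x :: y :: rs) (-1) 0, 1]]
              = [obs, x] :: chainB 1 x (y :: rs) (act * 2)
          rw [critic_bridge, pyGetD_last_cons]
          have := critic_core rs x y obs 1 (act * 2)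
          simpa [chainB, chainB_zero_eq_spine] using this
    · -- psi
      subst h
      cases rest with
      | nil =>
          show ((PySem.List.pyRange 0 ((([x] : List Int)).length : Int) 1).foldl
                (fun layer_dims i => layer_dims ++ [if i == 0 then
                    [obs, PySem.List.pyGetD [x] i 0]
                  else if i == 1 then
                    [PySem.List.pyGetD [x] (i - 1) 0 + act * 2, PySem.List.pyGetD [x] i 0]
                  else
                    [PySem.List.pyGetD [x] (i - 1) 0, PySem.List.pyGetD [x] i 0]]) [])
              ++ [[PySem.List.pyGetD [x] (-1) 0, feat]]
              = [obs, x] :: chainB feat x [] (act * 2)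
          rw [critic_bridge, pyGetD_last_cons]
          simp [fCri, chainB, List.range_succ]
      | cons y rs =>
          show ((PySem.List.pyRange 0 (((x :: y :: rs) : List Int).length : Int) 1).foldl
                (fun layer_dims i => layer_dims ++ [if i == 0 then
                    [obs, PySem.List.pyGetD (x :: y :: rs) i 0]
                  else if i == 1 then
                    [PySem.List.pyGetD (x :: y :: rs) (i - 1) 0 + act * 2, PySem.List.pyGetD (x :: y :: rs) i 0]
                  else
                    [PySem.List.pyGetD (x :: y :: rs) (i - 1) 0, PySem.List.pyGetD (x :: y :: rs) i 0]]) [])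
              ++ [[PySem.List.pyGetD (x :: y :: rs) (-1) 0, feat]]
              = [obs, x] :: chainB feat x (y :: rs) (act * 2)
          rw [critic_bridge, pyGetD_last_cons]
          have := critic_core rs x y obs feat (act * 2)
          simpa [chainB, chainB_zero_eq_spine] using this
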